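-- pv_equiv track=rewrite | github.com/rachellehmbs/boolean-lwr | anf_lwr_computation.py | permutation_u_to_v
-- ===== SOURCE A (Python) =====
-- def permutation_u_to_v(mask_u, mask_v):
--     p = [None for _ in range(len(mask_u))]
--     last_encountered = dict()
--     for i, val in enumerate(mask_v):
--         if val not in last_encountered:
--             last_encountered[val] = -1
--         for j in range(last_encountered[val] + 1, len(mask_u)):
--             if mask_u[j] == val:
--                 last_encountered[val] = j
--                 p[i] = j
--                 break
--     return p
-- ===== SOURCE B (Python) =====
-- def permutation_u_to_v(mask_u, mask_v):
--     # Precompute value -> list of its positions in mask_u; per value, consume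
--     # positions in order (k = how many times the value has occurred in mask_v so far).
--     occ = {}
--     for j, val in enumerate(mask_u):
--         occ.setdefault(val, []).append(j)
--     seen = {}
--     p = [None] * len(mask_u)
--     for i, val in enumerate(mask_v):
--         k = seen.get(val, 0)
--         seen[val] = k + 1
--         lst = occ.get(val, [])
--         if k < len(lst):
--             p[i] = lst[k]
--     return p
-- ===== Notes on version B (the rewrite author's own statement) =====
-- stated objective: faster
-- what changed: Instead of rescanning mask_u from the last matched position for every mask_v entry (nested loops), B precomputes once a dict value -> list of its positions in mask_u and answers each mask_v entry by indexing that list with the number of prior occurrences of the value in mask_v, one O(1) step per entry.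
import Mathlib
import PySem

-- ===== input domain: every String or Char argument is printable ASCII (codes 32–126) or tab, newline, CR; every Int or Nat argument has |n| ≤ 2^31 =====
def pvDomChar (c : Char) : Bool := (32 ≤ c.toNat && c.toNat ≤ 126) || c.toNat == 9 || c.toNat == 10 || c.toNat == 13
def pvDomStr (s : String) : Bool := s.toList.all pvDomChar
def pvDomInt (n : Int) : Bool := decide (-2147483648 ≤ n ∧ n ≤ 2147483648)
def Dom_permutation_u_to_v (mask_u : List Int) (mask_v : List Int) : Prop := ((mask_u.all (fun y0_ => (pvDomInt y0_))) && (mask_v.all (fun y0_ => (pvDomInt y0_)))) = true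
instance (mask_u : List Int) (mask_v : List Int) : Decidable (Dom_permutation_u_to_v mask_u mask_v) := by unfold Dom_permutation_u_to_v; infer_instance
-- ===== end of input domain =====

-- B replaces A's per-entry rescan of mask_u by a precomputed value->positions dict consumed left to right (objective: faster).


-- ===== PORT A =====
-- inner 'for j in range(last+1, len(mask_u)): if mask_u[j] == val: … break'
def innerA (mask_u : List Int) (v : Int) : List Int → Option Int
  | [] => none
  | j :: rest => if PySem.List.pyGetD mask_u j 0 = v then some j else innerA mask_u v rest

def loopA (mask_u : List Int) : List (Int × Int) → List (Option Int) → PySem.Dict Int Int → List (Option Int)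
  | [], p, _ => p
  | (i, val) :: rest, p, last =>
      let last1 := if last.contains val then last else last.insert val (-1)
      match innerA mask_u val (PySem.List.pyRange (last1.getD val 0 + 1) (mask_u.length : Int) 1) with
      | some j => loopA mask_u rest (PySem.List.pySetD p i (some j)) (last1.insert val j)
      | none => loopA mask_u rest p last1

def permutation_u_to_v (mask_u : List Int) (mask_v : List Int) : List (Option Int) :=
  loopA mask_u (PySem.List.enumerate mask_v) (List.replicate mask_u.length none) PySem.Dict.empty

-- ===== PORT B =====
def loopB (occ : PySem.Dict Int (List Int)) : List (Int × Int) → List (Option Int) → PySem.Dict Int Int → List (Option Int)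
  | [], p, _ => p
  | (i, val) :: rest, p, seen =>
      let k := seen.getD val 0
      let seen1 := seen.insert val (k + 1)
      let lst := occ.getD val []
      let p1 := if k < (lst.length : Int) then PySem.List.pySetD p i (some (PySem.List.pyGetD lst k 0)) else p
      loopB occ rest p1 seen1

def permutation_u_to_v_alt (mask_u : List Int) (mask_v : List Int) : List (Option Int) :=
  let occ := (PySem.List.enumerate mask_u).foldl (fun d q => d.modify q.2 [] (fun L => L ++ [q.1])) PySem.Dict.empty
  loopB occ (PySem.List.enumerate mask_v) (List.replicate mask_u.length none) PySem.Dict.empty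

-- ===== PRECONDITION & SPEC =====
-- Pre_ excludes exactly the inputs on which Python A raises IndexError (p[i] = j with
-- i ≥ len(mask_u)): an index i ≥ len(mask_u) into mask_v whose value still has an
-- unconsumed occurrence in mask_u.  (Python B raises there too.)
def Pre_permutation_u_to_v (mask_u : List Int) (mask_v : List Int) : Prop :=
  ∀ i < mask_v.length, mask_u.length ≤ i →
    mask_u.count (mask_v.getD i 0) < (mask_v.take (i + 1)).count (mask_v.getD i 0)
instance (mask_u : List Int) (mask_v : List Int) : Decidable (Pre_permutation_u_to_v mask_u mask_v) := by unfold Pre_permutation_u_to_v; infer_instance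
def pvWitness_permutation_u_to_v : List Int × List Int := ([1, 2, 1], [2, 1, 1])
def Spec_permutation_u_to_v (mask_u : List Int) (mask_v : List Int) (out : List (Option Int)) : Prop := out = permutation_u_to_v_alt mask_u mask_v
instance (mask_u : List Int) (mask_v : List Int) (out : List (Option Int)) : Decidable (Spec_permutation_u_to_v mask_u mask_v out) := by unfold Spec_permutation_u_to_v; infer_instance

-- ===== CLAIM (what is proved, stated in full; the proofs are below) =====
def Claim_equal_permutation_u_to_v : Prop := ∀ (mask_u : List Int) (mask_v : List Int), Dom_permutation_u_to_v mask_u mask_v → Pre_permutation_u_to_v mask_u mask_v → Spec_permutation_u_to_v mask_u mask_v (permutation_u_to_v mask_u mask_v)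

-- ===== LEMMAS AND PROOFS =====

-- positions (as Python ints, offset s) of the occurrences of v in a list
def occAux (v : Int) : List Int → Int → List Int
  | [], _ => []
  | x :: xs, s => if x = v then s :: occAux v xs (s + 1) else occAux v xs (s + 1)

-- B's occ dict holds exactly these position lists
lemma occAux_eq_filter (v : Int) : ∀ (l : List Int) (s : Int),
    (((PySem.List.enumerate l s).map Prod.swap).filter (fun p => p.1 == v)).map (·.2) = occAux v l s := by
  intro l
  induction l with
  | nil => intro s; simp [PySem.List.enumerate_nil, occAux]
  | cons x xs ih =>
      intro s
      simp only [PySem.List.enumerate_cons, List.map_cons, List.filter_cons, occAux]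
      by_cases h : x = v
      · simp [h, ih]
      · simp [h, ih]

lemma occ_getD (mask_u : List Int) (v : Int) :
    ((PySem.List.enumerate mask_u).foldl (fun d q => d.modify q.2 [] (fun L => L ++ [q.1])) PySem.Dict.empty).getD v []
      = occAux v mask_u 0 := by
  have h1 : ((PySem.List.enumerate mask_u).map Prod.swap).foldl
      (fun d (p : Int × Int) => d.modify p.1 [] (fun L => L ++ [p.2])) PySem.Dict.empty
      = (PySem.List.enumerate mask_u).foldl (fun d q => d.modify q.2 [] (fun L => L ++ [q.1])) PySem.Dict.empty := by
    rw [List.foldl_map]; rfl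
  rw [← h1, PySem.Dict.getD_foldl_modify_append, PySem.Dict.getD_empty, List.nil_append,
    occAux_eq_filter]

-- A's scan from position s finds the first occurrence ≥ s
lemma innerA_scan (mask_u : List Int) (v : Int) : ∀ (n s : Nat), mask_u.length - s = n →
    innerA mask_u v (PySem.List.pyRange (s : Int) (mask_u.length : Int) 1)
      = (occAux v (mask_u.drop s) (s : Int)).head? := by
  intro n
  induction n with
  | zero =>
      intro s hs
      have hle : mask_u.length ≤ s := by omega
      rw [PySem.List.pyRange_one_eq_nil (by exact_mod_cast hle), List.drop_eq_nil_of_le hle]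
      simp [innerA, occAux]
  | succ n ih =>
      intro s hs
      have hlt : s < mask_u.length := by omega
      rw [PySem.List.pyRange_one_cons (by exact_mod_cast hlt)]
      rw [List.drop_eq_getElem_cons hlt]
      simp only [innerA, occAux]
      have hget : PySem.List.pyGetD mask_u (s : Int) 0 = mask_u[s] := by
        simp [PySem.List.pyGetD_natCast, List.getD_eq_getElem?_getD, List.getElem?_eq_getElem hlt]
      rw [hget]
      by_cases h : mask_u[s] = v
      · simp [h]
      · have : ((s : Int) + 1) = ((s + 1 : Nat) : Int) := by push_cast; ring
        rw [if_neg h, if_neg h, this, ih (s + 1) (by omega)]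

-- peeling the first remaining occurrence
lemma occAux_tail (mask_u : List Int) (v : Int) : ∀ (n s : Nat) (j : Int) (rest : List Int),
    mask_u.length - s = n →
    occAux v (mask_u.drop s) (s : Int) = j :: rest →
    0 ≤ j ∧ rest = occAux v (mask_u.drop (j + 1).toNat) (j + 1) := by
  intro n
  induction n with
  | zero =>
      intro s j rest hs h
      rw [List.drop_eq_nil_of_le (by omega)] at h
      simp [occAux] at h
  | succ n ih =>
      intro s j rest hs h
      have hlt : s < mask_u.length := by omega
      rw [List.drop_eq_getElem_cons hlt] at h
      simp only [occAux] at h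
      by_cases hv : mask_u[s] = v
      · rw [if_pos hv] at h
        obtain ⟨h1, h2⟩ := List.cons_eq_cons.mp h
        subst h1
        refine ⟨by omega, ?_⟩
        have ht : ((s : Int) + 1).toNat = s + 1 := by omega
        have hc : ((s : Int) + 1) = ((s + 1 : Nat) : Int) := by push_cast; ring
        rw [ht, ← h2, hc]
      · rw [if_neg hv] at h
        have : ((s : Int) + 1) = ((s + 1 : Nat) : Int) := by push_cast; ring
        rw [this] at h
        exact ih (s + 1) j rest (by omega) h

-- the simulation invariant between A's last_encountered and B's seen counters
def SimInv (mask_u : List Int) (lastA seen : PySem.Dict Int Int) : Prop :=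
  ∀ v : Int, ∃ k : Nat, seen.getD v 0 = (k : Int) ∧ 0 ≤ lastA.getD v (-1) + 1 ∧
    (occAux v mask_u 0).drop k = occAux v (mask_u.drop (lastA.getD v (-1) + 1).toNat) (lastA.getD v (-1) + 1)

lemma loop_eq (mask_u : List Int) (occ : PySem.Dict Int (List Int))
    (hocc : ∀ v, occ.getD v [] = occAux v mask_u 0) :
    ∀ (rest : List (Int × Int)) (p : List (Option Int)) (lastA seen : PySem.Dict Int Int),
    SimInv mask_u lastA seen → loopA mask_u rest p lastA = loopB occ rest p seen := by
  intro rest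
  induction rest with
  | nil => intro p lastA seen _; simp [loopA, loopB]
  | cons hd rest ih =>
      obtain ⟨i, val⟩ := hd
      intro p lastA seen hInv
      obtain ⟨k, hk, hs0, hdrop⟩ := hInv val
      simp only [loopA, loopB]
      set last1 : PySem.Dict Int Int := (if lastA.contains val then lastA else lastA.insert val (-1)) with hl1def
      -- A's effective scan start equals lastA.getD val (-1) + 1
      have hlast1 : last1.getD val 0 + 1 = lastA.getD val (-1) + 1 := by
        rw [hl1def]
        by_cases hc : lastA.contains val
        · simp only [if_pos hc]
          cases hget : lastA.get? val with
          | none =>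
              rw [PySem.Dict.get?_eq_none_iff_contains] at hget
              simp [hget] at hc
          | some w =>
              rw [PySem.Dict.getD_of_get?_eq_some lastA 0 hget,
                PySem.Dict.getD_of_get?_eq_some lastA (-1) hget]
        · simp only [if_neg hc]
          rw [PySem.Dict.getD_insert_self, PySem.Dict.getD_of_not_contains lastA (-1) (by simpa using hc)]
      have hlast1' : ∀ v', v' ≠ val → last1.getD v' (-1) = lastA.getD v' (-1) := by
        intro v' hne
        rw [hl1def]
        by_cases hc : lastA.contains val
        · simp only [if_pos hc]
        · simp only [if_neg hc, PySem.Dict.getD_insert_of_ne lastA (-1) (-1) hne]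
      have hlast1m : last1.getD val (-1) = lastA.getD val (-1) := by
        rw [hl1def]
        by_cases hc : lastA.contains val
        · simp only [if_pos hc]
        · simp only [if_neg hc]
          rw [PySem.Dict.getD_insert_self, PySem.Dict.getD_of_not_contains lastA (-1) (by simpa using hc)]
      rw [hlast1, hk, hocc val]
      -- the scan start as a natural number
      obtain ⟨sn, hsn⟩ : ∃ sn : Nat, lastA.getD val (-1) + 1 = (sn : Int) :=
        ⟨(lastA.getD val (-1) + 1).toNat, (Int.toNat_of_nonneg hs0).symm⟩
      rw [hsn] at hdrop
      simp only [Int.toNat_natCast] at hdrop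
      have hscan : innerA mask_u val (PySem.List.pyRange (lastA.getD val (-1) + 1) (mask_u.length : Int) 1)
          = (occAux val mask_u 0)[k]? := by
        rw [hsn, innerA_scan mask_u val (mask_u.length - sn) sn rfl]
        rw [← hdrop, List.head?_drop]
      cases hfind : (occAux val mask_u 0)[k]? with
      | some j =>
          have hklt : k < (occAux val mask_u 0).length := (List.getElem?_eq_some_iff.mp hfind).1
          rw [hscan.trans hfind]
          have hkl : ((k : Int)) < ((occAux val mask_u 0).length : Int) := by exact_mod_cast hklt
          rw [if_pos hkl]
          have hval : PySem.List.pyGetD (occAux val mask_u 0) (k : Int) 0 = j := by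
            rw [PySem.List.pyGetD_natCast]
            simp [List.getD_eq_getElem?_getD, hfind]
          rw [hval]
          -- peel the found occurrence
          have hcons : occAux val (mask_u.drop sn) (sn : Int) = j :: (occAux val mask_u 0).drop (k + 1) := by
            rw [← hdrop, List.drop_eq_getElem_cons hklt, (List.getElem?_eq_some_iff.mp hfind).2]
          obtain ⟨hj0, htail⟩ := occAux_tail mask_u val (mask_u.length - sn) sn j _ rfl hcons
          apply ih
          intro v'
          by_cases hv : v' = val
          · subst hv
            refine ⟨k + 1, ?_, ?_, ?_⟩
            · rw [PySem.Dict.getD_insert_self]; push_cast; ring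
            · rw [PySem.Dict.getD_insert_self]; omega
            · rw [PySem.Dict.getD_insert_self, htail]
          · obtain ⟨k', hk', hs0', hdrop'⟩ := hInv v'
            refine ⟨k', ?_, ?_, ?_⟩
            · rw [PySem.Dict.getD_insert_of_ne seen _ 0 hv, hk']
            · rw [PySem.Dict.getD_insert_of_ne last1 j (-1) hv, hlast1' v' hv]; exact hs0'
            · rw [PySem.Dict.getD_insert_of_ne last1 j (-1) hv, hlast1' v' hv]; exact hdrop'
      | none =>
          have hkge : (occAux val mask_u 0).length ≤ k := List.getElem?_eq_none_iff.mp hfind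
          rw [hscan.trans hfind]
          have hkl : ¬ ((k : Int)) < ((occAux val mask_u 0).length : Int) := by exact_mod_cast not_lt.mpr hkge
          rw [if_neg hkl]
          apply ih
          intro v'
          by_cases hv : v' = val
          · have hnil : (occAux val mask_u 0).drop k = [] := List.drop_eq_nil_of_le hkge
            subst hv
            refine ⟨k + 1, ?_, ?_, ?_⟩
            · rw [PySem.Dict.getD_insert_self]; push_cast; ring
            · rw [hlast1m]; exact hs0
            · rw [hlast1m, hsn]
              simp only [Int.toNat_natCast]
              rw [← hdrop, hnil, List.drop_eq_nil_of_le (by omega)]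
          · obtain ⟨k', hk', hs0', hdrop'⟩ := hInv v'
            refine ⟨k', ?_, ?_, ?_⟩
            · rw [PySem.Dict.getD_insert_of_ne seen _ 0 hv, hk']
            · rw [hlast1' v' hv]; exact hs0'
            · rw [hlast1' v' hv]; exact hdrop'

-- ===== VERDICT (by name: the statement is the Claim_ definition above) =====
theorem permutation_u_to_v_spec : Claim_equal_permutation_u_to_v := by
  intro mask_u mask_v _ _
  unfold Spec_permutation_u_to_v permutation_u_to_v permutation_u_to_v_alt
  exact loop_eq mask_u _ (occ_getD mask_u) _ _ _ _
    (fun v => ⟨0, by simp [PySem.Dict.getD_empty]⟩)
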